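-- pv_equiv track=rewrite | github.com/alakanu/Advent-of-code | 2025/Day3/Part2.py | findLeftmostBiggestNumberIndex
-- ===== SOURCE A (Python) =====
-- def findLeftmostBiggestNumberIndex(batteries):
--     biggestIndex = 0
--     biggest = int(batteries[biggestIndex])
--     for i in range(0, len(batteries)):
--         number = int(batteries[i])
--         if number > biggest:
--             biggest = number
--             biggestIndex = i
--     return biggestIndex
-- ===== SOURCE B (Python) =====
-- def findLeftmostBiggestNumberIndex(batteries):
--     values = [int(b) for b in batteries]
--     return values.index(max(values))
-- ===== Notes on version B (the rewrite author's own statement) =====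
-- stated objective: idiomatic
-- what changed: Replaces A's single tracking scan (running biggest + index) with the idiomatic two-pass decomposition: build the int list once, take max(), return its first index with list.index().
import Mathlib
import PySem

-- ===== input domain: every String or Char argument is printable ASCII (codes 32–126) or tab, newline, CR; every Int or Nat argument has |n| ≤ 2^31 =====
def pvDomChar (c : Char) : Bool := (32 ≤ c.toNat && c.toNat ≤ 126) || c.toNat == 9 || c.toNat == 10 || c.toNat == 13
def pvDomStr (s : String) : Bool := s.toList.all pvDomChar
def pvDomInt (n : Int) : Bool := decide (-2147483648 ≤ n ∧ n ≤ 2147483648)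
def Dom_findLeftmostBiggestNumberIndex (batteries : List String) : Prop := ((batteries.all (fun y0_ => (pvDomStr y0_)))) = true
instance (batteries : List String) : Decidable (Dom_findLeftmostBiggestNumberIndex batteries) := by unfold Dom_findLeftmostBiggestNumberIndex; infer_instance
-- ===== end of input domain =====

-- B replaces A's single tracking scan with a two-pass max-then-first-index decomposition (same O(n) cost, more idiomatic).

-- ===== PORT A =====
def findLeftmostBiggestNumberIndex (batteries : List String) : Int :=
  let biggest : Int := (PySem.Int.ofStr? (PySem.List.pyGetD batteries 0 "")).getD 0
  let st :=
    (PySem.List.pyRange 0 (batteries.length : Int) 1).foldl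
      (fun (st : Int × Int) (i : Int) =>
        let number : Int := (PySem.Int.ofStr? (PySem.List.pyGetD batteries i "")).getD 0
        if number > st.1 then (number, i) else st)
      (biggest, 0)
  st.2

-- ===== PORT B =====
def findLeftmostBiggestNumberIndex_alt (batteries : List String) : Int :=
  let values := batteries.map (fun b => (PySem.Int.ofStr? b).getD 0)
  match PySem.List.max? values (fun y => y) with
  | some m => ((PySem.List.index? values m).getD 0 : Nat)
  | none => 0

-- ===== PRECONDITION & SPEC =====
-- Pre_ excludes exactly the inputs on which Python A raises: the empty list (IndexError) and
-- lists containing a string int() rejects (ValueError).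
def Pre_findLeftmostBiggestNumberIndex (batteries : List String) : Prop :=
  batteries ≠ [] ∧ ∀ s ∈ batteries, (PySem.Int.ofStr? s).isSome = true
instance (batteries : List String) : Decidable (Pre_findLeftmostBiggestNumberIndex batteries) := by
  unfold Pre_findLeftmostBiggestNumberIndex; infer_instance

def pvWitness_findLeftmostBiggestNumberIndex : List String := ["3", "-7", " 12 ", "12"]

def Spec_findLeftmostBiggestNumberIndex (batteries : List String) (out : Int) : Prop := out = findLeftmostBiggestNumberIndex_alt batteries
instance (batteries : List String) (out : Int) : Decidable (Spec_findLeftmostBiggestNumberIndex batteries out) := by unfold Spec_findLeftmostBiggestNumberIndex; infer_instance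

-- ===== CLAIM (what is proved, stated in full; the proofs are below) =====
def Claim_equal_findLeftmostBiggestNumberIndex : Prop := ∀ (batteries : List String), Dom_findLeftmostBiggestNumberIndex batteries → Pre_findLeftmostBiggestNumberIndex batteries → Spec_findLeftmostBiggestNumberIndex batteries (findLeftmostBiggestNumberIndex batteries)

-- ===== LEMMAS AND PROOFS =====

-- the per-element int conversion (with 0 standing for the excluded ValueError case)
def pvVal (s : String) : Int := (PySem.Int.ofStr? s).getD 0

-- the body of A's loop, expressed over the list of already-converted values
def pvStep (vs : List Int) (st : Int × Int) (i : Int) : Int × Int :=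
  let number := PySem.List.pyGetD vs i 0
  if number > st.1 then (number, i) else st

lemma pvGetD_map_val (batteries : List String) (i : Int) :
    (PySem.Int.ofStr? (PySem.List.pyGetD batteries i "")).getD 0
      = PySem.List.pyGetD (batteries.map pvVal) i 0 := by
  have h := PySem.List.pyGetD_map pvVal batteries i ""
  simpa [pvVal] using h.symm

lemma portA_as_loop (batteries : List String) :
    findLeftmostBiggestNumberIndex batteries
      = ((PySem.List.pyRange 0 (batteries.length : Int) 1).foldl
          (pvStep (batteries.map pvVal))
          (PySem.List.pyGetD (batteries.map pvVal) 0 0, 0)).2 := by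
  simp only [findLeftmostBiggestNumberIndex, pvGetD_map_val]
  rfl

lemma pvGetD_int (vs : List Int) (k : Nat) :
    PySem.List.pyGetD vs (k : Int) 0 = vs.getD k 0 := by
  rw [PySem.List.pyGetD_of_nonneg vs 0 (by positivity)]
  simp

-- loop invariant for A's scan: after the first k iterations the state is the leftmost maximum
-- of the first k values, together with its index
lemma loopA (vs : List Int) : ∀ k : Nat, 1 ≤ k → k ≤ vs.length →
    ∃ j : Nat, j < k ∧
      (PySem.List.pyRange 0 (k : Int) 1).foldl (pvStep vs) (vs.getD 0 0, 0) = (vs.getD j 0, (j : Int)) ∧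
      (∀ i : Nat, i < k → vs.getD i 0 ≤ vs.getD j 0) ∧
      (∀ i : Nat, i < j → vs.getD i 0 < vs.getD j 0) := by
  intro k
  induction k with
  | zero => intro h; omega
  | succ k ih =>
    intro _ hlen
    by_cases hk : k = 0
    · subst hk
      refine ⟨0, by omega, ?_, ?_, ?_⟩
      · have h1 : ((1 : Nat) : Int) = (0 : Int) + 1 := by norm_num
        rw [h1, PySem.List.pyRange_one_singleton]
        have h0 : PySem.List.pyGetD vs (0 : Int) 0 = vs.getD 0 0 := by
          simpa using pvGetD_int vs 0
        simp only [List.foldl_cons, List.foldl_nil, pvStep, h0, Nat.cast_zero]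
        rw [if_neg (lt_irrefl _)]
      · intro i hi; interval_cases i; exact le_refl _
      · intro i hi; omega
    · obtain ⟨j, hj, heq, hmax, hfirst⟩ := ih (by omega) (by omega)
      have hcast : ((k + 1 : Nat) : Int) = (k : Int) + 1 := by push_cast; ring
      rw [hcast, PySem.List.pyRange_one_succ_right (by positivity), List.foldl_append, heq]
      simp only [List.foldl_cons, List.foldl_nil, pvStep, pvGetD_int vs k]
      by_cases hgt : vs.getD k 0 > vs.getD j 0
      · rw [if_pos hgt]
        refine ⟨k, by omega, rfl, ?_, ?_⟩
        · intro i hi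
          by_cases hik : i < k
          · exact le_of_lt (lt_of_le_of_lt (hmax i hik) hgt)
          · have : i = k := by omega
            subst this; exact le_refl _
        · intro i hi
          exact lt_of_le_of_lt (hmax i hi) hgt
      · rw [if_neg hgt]
        refine ⟨j, by omega, rfl, ?_, hfirst⟩
        intro i hi
        by_cases hik : i < k
        · exact hmax i hik
        · have : i = k := by omega
          subst this; omega

lemma index?_first (vs : List Int) (j : Nat) (hj : j < vs.length)
    (hfirst : ∀ i : Nat, i < j → vs.getD i 0 < vs.getD j 0) :
    PySem.List.index? vs (vs[j]'hj) = some j := by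
  rw [PySem.List.index?_eq_some_iff]
  refine ⟨vs.take j, vs.drop (j + 1), ?_, ?_, ?_⟩
  · conv_lhs => rw [← List.take_append_drop j vs, List.drop_eq_getElem_cons hj]
  · simp; omega
  · intro hmem
    obtain ⟨i, hilt, hi⟩ := List.mem_iff_getElem.mp hmem
    have hij : i < j := by
      have := hilt; simp [List.length_take] at this; omega
    have hiv : i < vs.length := by omega
    rw [List.getElem_take] at hi
    have h1 : vs.getD i 0 = vs[i]'hiv := List.getD_eq_getElem vs 0 hiv
    have h2 : vs.getD j 0 = vs[j]'hj := List.getD_eq_getElem vs 0 hj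
    have := hfirst i hij
    rw [h1, h2, hi] at this
    exact lt_irrefl _ this

-- ===== VERDICT (by name: the statement is the Claim_ definition above) =====
theorem findLeftmostBiggestNumberIndex_spec : Claim_equal_findLeftmostBiggestNumberIndex := by
  intro batteries _ hpre
  unfold Spec_findLeftmostBiggestNumberIndex
  obtain ⟨hne, _⟩ := hpre
  obtain ⟨v0, t, hvs⟩ := List.exists_cons_of_ne_nil (show batteries.map pvVal ≠ [] by simpa)
  have hlen : batteries.length = (v0 :: t).length := by
    rw [← hvs]; simp
  have hlenpos : 1 ≤ (v0 :: t).length := by simp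
  obtain ⟨j, hj, heq, hmax, hfirst⟩ := loopA (v0 :: t) (v0 :: t).length hlenpos (le_refl _)
  -- A's value
  have hA : findLeftmostBiggestNumberIndex batteries = (j : Int) := by
    rw [portA_as_loop, hvs, hlen]
    have h0 : PySem.List.pyGetD (v0 :: t) 0 0 = (v0 :: t).getD 0 0 := pvGetD_int (v0 :: t) 0
    rw [h0, heq]
  -- B's value
  have hjlt : j < (v0 :: t).length := hj
  have hM : List.foldl max v0 t = (v0 :: t).getD j 0 := by
    have hmem : List.foldl max v0 t ∈ (v0 :: t) := by
      rcases PySem.List.foldl_max_mem t v0 with h | h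
      · rw [h]; exact List.mem_cons_self
      · exact List.mem_cons_of_mem _ h
    obtain ⟨i, hiv, hival⟩ := List.mem_iff_getElem.mp hmem
    have hle1 : List.foldl max v0 t ≤ (v0 :: t).getD j 0 := by
      have hgi : (v0 :: t).getD i 0 = List.foldl max v0 t := by
        rw [List.getD_eq_getElem _ 0 hiv, hival]
      rw [← hgi]; exact hmax i hiv
    have hle2 : (v0 :: t).getD j 0 ≤ List.foldl max v0 t := by
      have hmem2 : (v0 :: t).getD j 0 ∈ (v0 :: t) := by
        rw [List.getD_eq_getElem _ 0 hjlt]; exact List.getElem_mem hjlt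
      rcases List.mem_cons.mp hmem2 with h | h
      · rw [h]; exact (PySem.List.le_foldl_max t v0).1
      · exact (PySem.List.le_foldl_max t v0).2 _ h
    exact le_antisymm hle1 hle2
  have hB : findLeftmostBiggestNumberIndex_alt batteries = (j : Int) := by
    unfold findLeftmostBiggestNumberIndex_alt
    have hval : (fun b => (PySem.Int.ofStr? b).getD 0) = pvVal := rfl
    rw [hval, hvs]
    have hgetj : (v0 :: t).getD j 0 = (v0 :: t)[j]'hjlt := List.getD_eq_getElem _ 0 hjlt
    have hidx : PySem.List.index? (v0 :: t) (List.foldl max v0 t) = some j := by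
      rw [hM, hgetj]
      exact index?_first (v0 :: t) j hjlt hfirst
    simp only [PySem.List.max?_id_cons, hidx, Option.getD_some]
  rw [hA, hB]
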